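-- pv_equiv track=rewrite | github.com/pypi-data/pypi-mirror-64 | packages/py-gql/py_gql-0.6.1.tar.gz/py_gql-0.6.1/src/py_gql/_string_utils.py | _split_words_with_boundaries
-- ===== SOURCE A (Python) =====
-- from typing import (
--     Callable,
--     Container,
--     Iterable,
--     Iterator,
--     List,
--     Match,
--     Sequence,
--     Tuple,
--     Union,
--     cast,
-- )
--
-- def _split_words_with_boundaries(
--     string: str, word_boundaries: Container[str]
-- ) -> Iterator[str]:
--     """
--     Split a string around given separators, conserving the separators.
--
--     >>> list(_split_words_with_boundaries("ab cd -ef_gh", " -_"))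
--     ['ab', ' ', 'cd', ' ', '-', 'ef', '_', 'gh']
--     """
--     stack = []  # type: List[str]
--     for char in string:
--         if char in word_boundaries:
--             if stack:
--                 yield "".join(stack)
--             yield char
--             stack[:] = []
--         else:
--             stack.append(char)
--
--     if stack:
--         yield "".join(stack)
-- ===== SOURCE B (Python) =====
-- def _split_words_with_boundaries(string, word_boundaries):
--     """Run-based scan: boundary chars are yielded one-by-one; a non-boundary
--     char starts an inner scan to the end of its maximal run, which is yielded
--     as one slice."""
--     i = 0
--     n = len(string)
--     while i < n:
--         ch = string[i]
--         if ch in word_boundaries: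
--             yield ch
--             i += 1
--         else:
--             j = i + 1
--             while j < n and string[j] not in word_boundaries:
--                 j += 1
--             yield string[i:j]
--             i = j
-- ===== Notes on version B (the rewrite author's own statement) =====
-- stated objective: alternative
-- what changed: Replaces A's character-accumulator (a growing stack flushed at each boundary) with a run-based scan: an inner scan finds the end of each maximal non-boundary run and yields it as a single slice, so no per-character list is built or joined.
import Mathlib
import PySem

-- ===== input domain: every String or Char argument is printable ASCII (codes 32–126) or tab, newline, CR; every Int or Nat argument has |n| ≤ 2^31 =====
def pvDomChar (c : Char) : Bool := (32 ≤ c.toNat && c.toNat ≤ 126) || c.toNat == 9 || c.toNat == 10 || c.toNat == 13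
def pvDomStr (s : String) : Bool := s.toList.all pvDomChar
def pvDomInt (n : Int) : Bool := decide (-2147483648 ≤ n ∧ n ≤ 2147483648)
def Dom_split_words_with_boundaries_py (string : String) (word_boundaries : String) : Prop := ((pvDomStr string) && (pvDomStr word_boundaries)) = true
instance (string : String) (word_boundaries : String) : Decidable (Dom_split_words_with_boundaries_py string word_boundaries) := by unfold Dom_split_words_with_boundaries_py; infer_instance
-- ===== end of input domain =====

-- B replaces A's character-accumulator loop with a run-based scan (inner scan
-- to the end of each maximal non-boundary run, yielded as one slice); an
-- alternative decomposition, same O(n) cost.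


-- ===== PORT A =====
-- one loop step: `if char in word_boundaries: (flush stack, yield char, clear) else: stack.append(char)`
def pvAStep (wb : List Char) (st : List Char × List String) (c : Char) : List Char × List String :=
  if wb.contains c then
    ([], (if st.1 ≠ [] then st.2 ++ [String.mk st.1] else st.2) ++ [String.mk [c]])
  else
    (st.1 ++ [c], st.2)

def split_words_with_boundaries_py (string : String) (word_boundaries : String) : List String :=
  let st := string.toList.foldl (pvAStep word_boundaries.toList) ([], [])
  if st.1 ≠ [] then st.2 ++ [String.mk st.1] else st.2

-- ===== PORT B =====
-- the outer while loop of Source B: a boundary char is emitted alone; otherwise the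
-- inner `while j < n and string[j] not in word_boundaries` scan is the
-- takeWhile/dropWhile over the rest, and string[i:j] the emitted run
def pvBGo (wb : List Char) : List Char → List String
  | [] => []
  | c :: rest =>
    if wb.contains c then
      String.mk [c] :: pvBGo wb rest
    else
      String.mk (c :: rest.takeWhile (fun d => !wb.contains d)) ::
        pvBGo wb (rest.dropWhile (fun d => !wb.contains d))
termination_by l => l.length
decreasing_by
  · simp
  · exact Nat.lt_succ_of_le (List.length_dropWhile_le _ _)

def split_words_with_boundaries_py_alt (string : String) (word_boundaries : String) : List String :=
  pvBGo word_boundaries.toList string.toList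

-- ===== PRECONDITION & SPEC =====
def Spec_split_words_with_boundaries_py (string : String) (word_boundaries : String) (out : List String) : Prop := out = split_words_with_boundaries_py_alt string word_boundaries
instance (string : String) (word_boundaries : String) (out : List String) : Decidable (Spec_split_words_with_boundaries_py string word_boundaries out) := by unfold Spec_split_words_with_boundaries_py; infer_instance

-- ===== CLAIM (what is proved, stated in full; the proofs are below) =====
def Claim_equal_split_words_with_boundaries_py : Prop := ∀ (string : String) (word_boundaries : String), Dom_split_words_with_boundaries_py string word_boundaries → Spec_split_words_with_boundaries_py string word_boundaries (split_words_with_boundaries_py string word_boundaries)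

-- ===== LEMMAS AND PROOFS =====

-- A's loop, restated recursively with the pending stack as an argument
def pvAGo (wb : List Char) (stack : List Char) : List Char → List String
  | [] => if stack ≠ [] then [String.mk stack] else []
  | c :: rest =>
    if wb.contains c then
      (if stack ≠ [] then [String.mk stack] else []) ++ String.mk [c] :: pvAGo wb [] rest
    else
      pvAGo wb (stack ++ [c]) rest

theorem pvA_foldl (wb : List Char) : ∀ (l : List Char) (stack : List Char) (out : List String),
    (let st := l.foldl (pvAStep wb) (stack, out)
     if st.1 ≠ [] then st.2 ++ [String.mk st.1] else st.2) = out ++ pvAGo wb stack l := by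
  intro l
  induction l with
  | nil =>
    intro stack out
    simp only [List.foldl, pvAGo]
    split <;> simp
  | cons c rest ih =>
    intro stack out
    simp only [List.foldl, pvAStep, pvAGo]
    by_cases h : wb.contains c
    · simp only [h, if_pos, ih]
      split <;> simp
    · simp only [h, Bool.false_eq_true, if_false, ih]

theorem pvBGo_unfold_run (wb : List Char) (l : List Char) :
    pvBGo wb l =
      (if l.takeWhile (fun d => !wb.contains d) ≠ [] then
        [String.mk (l.takeWhile (fun d => !wb.contains d))] else []) ++
      pvBGo wb (l.dropWhile (fun d => !wb.contains d)) := by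
  cases l with
  | nil => simp [pvBGo]
  | cons c rest =>
    by_cases h : c ∈ wb
    · simp [pvBGo, h]
    · simp [pvBGo, h]

theorem pvBGo_flush (wb : List Char) : ∀ (l : List Char) (stack : List Char),
    pvAGo wb stack l =
      (if stack ++ l.takeWhile (fun d => !wb.contains d) ≠ [] then
        [String.mk (stack ++ l.takeWhile (fun d => !wb.contains d))] else []) ++
      pvBGo wb (l.dropWhile (fun d => !wb.contains d)) := by
  intro l
  induction l with
  | nil => intro stack; simp [pvAGo, pvBGo]
  | cons c rest ih =>
    intro stack
    by_cases h : wb.contains c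
    · simp only [pvAGo, h, if_true, List.takeWhile_cons, List.dropWhile_cons,
        Bool.not_true, Bool.false_eq_true, if_false,
        List.append_nil, pvBGo, ih]
      simpa using (pvBGo_unfold_run wb rest).symm
    · simp only [pvAGo, h, Bool.false_eq_true, if_false, ih,
        List.takeWhile_cons, List.dropWhile_cons, Bool.not_false, if_true]
      simp [List.append_assoc]

-- ===== VERDICT (by name: the statement is the Claim_ definition above) =====
theorem split_words_with_boundaries_py_spec : Claim_equal_split_words_with_boundaries_py := by
  intro string word_boundaries _
  show _ = _
  unfold split_words_with_boundaries_py split_words_with_boundaries_py_alt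
  rw [pvA_foldl, pvBGo_flush]
  simp only [List.nil_append]
  rw [← pvBGo_unfold_run]
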